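-- pv_equiv track=rewrite | github.com/rishikeshsreehari/moxie | cmo/scripts/read_operating_assumptions.py | should_suppress_issue
-- ===== SOURCE A (Python) =====
-- def should_suppress_issue(issue_text, assumptions):
--     """
--     Check if an issue should be suppressed based on operating assumptions.
--
--     Args:
--         issue_text (str): The issue text to check
--         assumptions (dict): Parsed assumptions from get_operating_assumptions()
--
--     Returns:
--         bool: True if issue should be suppressed, False if it should be surfaced
--     """
--     issue_lower = issue_text.lower()
--
--     # Check Reddit-related issues
--     if any(keyword in issue_lower for keyword in ['reddit', 'credential', 'post']):
--         # If it's about Reddit posting, check if Rishi posts himself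
--         if 'rishi posts' in ' '.join(assumptions.get('Reddit & Social Media', [])).lower():
--             return True
--
--         # If it's asking for Reddit credentials, suppress
--         if 'credential' in issue_lower and 'reddit' in issue_lower:
--             return True
--
--     # Check GSC-related issues
--     if any(keyword in issue_lower for keyword in ['search console', 'gsc', 'google']):
--         # If GSA exists, suppress missing flags unless there's an actual error
--         if 'service account exists' in ' '.join(assumptions.get('Credentials & Service Accounts', [])).lower():
--             return True
--
--     # Check Dashboard QA issues
--     if any(keyword in issue_lower for keyword in ['dashboard', 'qa', 'quality assurance']):
--         # If QA is signed off, suppress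
--         if 'signed off' in ' '.join(assumptions.get('Quality Assurance', [])).lower():
--             return True
--
--     return False
-- ===== SOURCE B (Python) =====
-- # Inverted data flow: instead of testing the issue text rule by rule and looking
-- # up an assumptions section for each rule, scan the assumptions ONCE to collect
-- # the keywords they activate, then make a single pass over the issue text
-- # against that collected keyword list (plus the one unconditional check).
--
-- # section name -> (phrase enabling suppression, keywords it activates)
-- _SECTION_EFFECTS = {
--     'Reddit & Social Media': ('rishi posts', ['reddit', 'credential', 'post']),
--     'Credentials & Service Accounts': ('service account exists', ['search console', 'gsc', 'google']),
--     'Quality Assurance': ('signed off', ['dashboard', 'qa', 'quality assurance']),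
-- }
--
--
-- def should_suppress_issue(issue_text, assumptions):
--     text = issue_text.lower()
--     # Unconditional rule: asking for Reddit credentials is always suppressed.
--     if 'credential' in text and 'reddit' in text:
--         return True
--     # Pass 1: derive the set of activated suppressor keywords from the assumptions.
--     active = []
--     for section, lines in assumptions.items():
--         effect = _SECTION_EFFECTS.get(section)
--         if effect is not None and effect[0] in ' '.join(lines).lower():
--             active += effect[1]
--     # Pass 2: one scan of the issue text against the activated keywords.
--     return any(keyword in text for keyword in active)
-- ===== Notes on version B (the rewrite author's own statement) =====
-- stated objective: alternative
-- what changed: Inverted the data flow: instead of A's text-first rule blocks each doing its own assumptions lookup, B first scans the assumptions once to collect the suppressor keywords they activate, then makes a single scan of the issue text against that collected list (plus the one unconditional credential+reddit check).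
import Mathlib
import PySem

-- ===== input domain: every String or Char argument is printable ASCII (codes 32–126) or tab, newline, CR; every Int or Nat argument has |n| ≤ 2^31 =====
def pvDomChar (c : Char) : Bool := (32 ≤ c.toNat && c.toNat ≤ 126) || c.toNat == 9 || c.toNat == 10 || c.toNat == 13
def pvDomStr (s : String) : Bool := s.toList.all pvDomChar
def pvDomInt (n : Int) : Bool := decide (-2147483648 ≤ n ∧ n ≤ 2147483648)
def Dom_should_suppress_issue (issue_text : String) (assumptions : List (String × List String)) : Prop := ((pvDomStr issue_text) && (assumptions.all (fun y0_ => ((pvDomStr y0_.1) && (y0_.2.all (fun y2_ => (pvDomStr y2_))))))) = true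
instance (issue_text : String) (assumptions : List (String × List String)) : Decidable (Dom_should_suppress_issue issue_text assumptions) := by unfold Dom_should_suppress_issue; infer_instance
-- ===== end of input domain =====

-- B inverts the data flow: one pass over the assumptions collects the activated suppressor keywords, then one scan of the issue text checks them (objective: alternative; same cost).

-- ===== PORT A =====
-- ' '.join(assumptions.get(section, [])).lower()
def pvSectionText (assumptions : List (String × List String)) (sec : String) : String :=
  PySem.Str.lower (PySem.Str.join " " ((PySem.Dict.mk assumptions).getD sec []))

-- the third if-block ("Dashboard QA") and the final 'return False'
def pvA_check3 (issue_lower : String) (assumptions : List (String × List String)) : Bool :=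
  if ["dashboard", "qa", "quality assurance"].any (fun k => PySem.Str.isIn k issue_lower) then
    if PySem.Str.isIn "signed off" (pvSectionText assumptions "Quality Assurance") then true
    else false
  else false

-- the second if-block ("GSC-related"), falling through to the third
def pvA_check2 (issue_lower : String) (assumptions : List (String × List String)) : Bool :=
  if ["search console", "gsc", "google"].any (fun k => PySem.Str.isIn k issue_lower) then
    if PySem.Str.isIn "service account exists" (pvSectionText assumptions "Credentials & Service Accounts") then true
    else pvA_check3 issue_lower assumptions
  else pvA_check3 issue_lower assumptions

def should_suppress_issue (issue_text : String) (assumptions : List (String × List String)) : Bool :=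
  let issue_lower := PySem.Str.lower issue_text
  if ["reddit", "credential", "post"].any (fun k => PySem.Str.isIn k issue_lower) then
    if PySem.Str.isIn "rishi posts" (pvSectionText assumptions "Reddit & Social Media") then true
    else if PySem.Str.isIn "credential" issue_lower && PySem.Str.isIn "reddit" issue_lower then true
    else pvA_check2 issue_lower assumptions
  else pvA_check2 issue_lower assumptions

-- ===== PORT B =====
-- _SECTION_EFFECTS.get(section): section name -> (phrase enabling suppression, keywords it activates)
def pvSectionEffect (sec : String) : Option (String × List String) :=
  (PySem.Dict.mk
    [("Reddit & Social Media", ("rishi posts", ["reddit", "credential", "post"])),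
     ("Credentials & Service Accounts", ("service account exists", ["search console", "gsc", "google"])),
     ("Quality Assurance", ("signed off", ["dashboard", "qa", "quality assurance"]))]).get? sec

-- 'if effect is not None and effect[0] in " ".join(lines).lower(): active += effect[1]'
def pvContrib (sec : String) (lines : List String) : List String :=
  match pvSectionEffect sec with
  | some effect =>
      if PySem.Str.isIn effect.1 (PySem.Str.lower (PySem.Str.join " " lines)) then effect.2 else []
  | none => []

-- pass 1: 'for section, lines in assumptions.items(): …'
def pvActive : List (String × List String) → List String
  | [] => []
  | (sec, lines) :: rest => pvContrib sec lines ++ pvActive rest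

def should_suppress_issue_alt (issue_text : String) (assumptions : List (String × List String)) : Bool :=
  let text := PySem.Str.lower issue_text
  if PySem.Str.isIn "credential" text && PySem.Str.isIn "reddit" text then true
  else (pvActive ((PySem.Dict.mk assumptions).items)).any (fun keyword => PySem.Str.isIn keyword text)

-- ===== PRECONDITION & SPEC =====
-- Pre_ excludes assoc lists with duplicate section keys: a Python dict cannot contain them,
-- so the assoc-list representation is ambiguous there (A's get() vs B's items() iteration is accidental).
def Pre_should_suppress_issue (issue_text : String) (assumptions : List (String × List String)) : Prop :=
  (assumptions.map Prod.fst).Nodup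
instance (issue_text : String) (assumptions : List (String × List String)) : Decidable (Pre_should_suppress_issue issue_text assumptions) := by unfold Pre_should_suppress_issue; infer_instance

def pvWitness_should_suppress_issue : String × (List (String × List String)) :=
  ("Reddit posting failed", [("Reddit & Social Media", ["Rishi posts himself"])])

def Spec_should_suppress_issue (issue_text : String) (assumptions : List (String × List String)) (out : Bool) : Prop := out = should_suppress_issue_alt issue_text assumptions
instance (issue_text : String) (assumptions : List (String × List String)) (out : Bool) : Decidable (Spec_should_suppress_issue issue_text assumptions out) := by unfold Spec_should_suppress_issue; infer_instance

-- ===== CLAIM (what is proved, stated in full; the proofs are below) =====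
def Claim_equal_should_suppress_issue : Prop := ∀ (issue_text : String) (assumptions : List (String × List String)), Dom_should_suppress_issue issue_text assumptions → Pre_should_suppress_issue issue_text assumptions → Spec_should_suppress_issue issue_text assumptions (should_suppress_issue issue_text assumptions)

-- ===== LEMMAS AND PROOFS =====

-- no phrase occurs in the empty section text (missing section)
theorem pvPhraseEmpty1 : PySem.Str.isIn "rishi posts" (PySem.Str.lower (PySem.Str.join " " ([] : List String))) = false := by
  simp only [PySem.Str.isIn, PySem.Str.lower, PySem.Str.join]; decide
theorem pvPhraseEmpty2 : PySem.Str.isIn "service account exists" (PySem.Str.lower (PySem.Str.join " " ([] : List String))) = false := by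
  simp only [PySem.Str.isIn, PySem.Str.lower, PySem.Str.join]; decide
theorem pvPhraseEmpty3 : PySem.Str.isIn "signed off" (PySem.Str.lower (PySem.Str.join " " ([] : List String))) = false := by
  simp only [PySem.Str.isIn, PySem.Str.lower, PySem.Str.join]; decide

-- characterisation of pass 1: with nodup section keys, the 'any' over the collected
-- keywords is the disjunction of the three (phrase-present && keyword-in-text) tests of A
set_option maxHeartbeats 1000000 in
theorem pvActive_any (text : String) (l : List (String × List String))
    (hnd : (l.map Prod.fst).Nodup) :
    (pvActive l).any (fun k => PySem.Str.isIn k text) =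
      ((PySem.Str.isIn "rishi posts" (pvSectionText l "Reddit & Social Media") &&
          (["reddit", "credential", "post"].any (fun k => PySem.Str.isIn k text))) ||
       (PySem.Str.isIn "service account exists" (pvSectionText l "Credentials & Service Accounts") &&
          (["search console", "gsc", "google"].any (fun k => PySem.Str.isIn k text))) ||
       (PySem.Str.isIn "signed off" (pvSectionText l "Quality Assurance") &&
          (["dashboard", "qa", "quality assurance"].any (fun k => PySem.Str.isIn k text)))) := by
  induction l with
  | nil =>
      rw [show ∀ sec, pvSectionText [] sec = PySem.Str.lower (PySem.Str.join " " []) from fun _ => rfl,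
          show ∀ sec, pvSectionText [] sec = PySem.Str.lower (PySem.Str.join " " []) from fun _ => rfl,
          show ∀ sec, pvSectionText [] sec = PySem.Str.lower (PySem.Str.join " " []) from fun _ => rfl,
          pvPhraseEmpty1, pvPhraseEmpty2, pvPhraseEmpty3]
      simp [pvActive]
  | cons hd tl ih =>
      obtain ⟨s, v⟩ := hd
      simp only [List.map_cons, List.nodup_cons] at hnd
      obtain ⟨hs, hnd'⟩ := hnd
      have hget : ∀ sec : String, sec ≠ s →
          pvSectionText ((s, v) :: tl) sec = pvSectionText tl sec := by
        intro sec hne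
        simp [pvSectionText, PySem.Dict.getD, PySem.Dict.get?_mk_cons,
          (by simpa using hne.symm : (s == sec) = false)]
      have hself : pvSectionText ((s, v) :: tl) s =
          PySem.Str.lower (PySem.Str.join " " v) := by
        simp only [pvSectionText, PySem.Dict.getD, PySem.Dict.get?_mk_cons, BEq.rfl, if_true,
          Option.getD_some]
      have habsent : ∀ sec : String, sec ∉ tl.map Prod.fst →
          pvSectionText tl sec = PySem.Str.lower (PySem.Str.join " " []) := by
        intro sec hmem
        have hn : (PySem.Dict.mk tl).get? sec = none := by
          rw [PySem.Dict.get?_eq_none_iff_not_mem_keys]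
          simpa [PySem.Dict.keys_mk] using hmem
        simp only [pvSectionText, PySem.Dict.getD, hn, Option.getD_none]
      simp only [pvActive, List.any_append, ih hnd']
      by_cases h1 : s = "Reddit & Social Media"
      · subst h1
        have hf : pvSectionEffect "Reddit & Social Media" =
              some ("rishi posts", ["reddit", "credential", "post"]) := by
          simp [pvSectionEffect, PySem.Dict.get?_mk_cons]
        have hcontrib : ∀ w, pvContrib "Reddit & Social Media" w =
            if PySem.Str.isIn "rishi posts" (PySem.Str.lower (PySem.Str.join " " w)) then
              ["reddit", "credential", "post"] else [] := by
          intro w; unfold pvContrib; rw [hf]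
        rw [hget "Credentials & Service Accounts" (by simp),
            hget "Quality Assurance" (by simp), hself,
            habsent "Reddit & Social Media" hs, pvPhraseEmpty1, hcontrib]
        split_ifs with hp
        · rw [hp]
          simp only [List.any_nil, Bool.false_and, Bool.true_and, Bool.false_or, Bool.or_false,
            Bool.or_assoc, Bool.or_comm, Bool.or_left_comm]
        · rw [Bool.eq_false_iff.mpr hp]
          simp only [List.any_nil, Bool.false_and, Bool.true_and, Bool.false_or, Bool.or_false,
            Bool.or_assoc, Bool.or_comm, Bool.or_left_comm]
      · by_cases h2 : s = "Credentials & Service Accounts"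
        · subst h2
          have hf : pvSectionEffect "Credentials & Service Accounts" =
                some ("service account exists", ["search console", "gsc", "google"]) := by
            simp [pvSectionEffect, PySem.Dict.get?_mk_cons]
          have hcontrib : ∀ w, pvContrib "Credentials & Service Accounts" w =
              if PySem.Str.isIn "service account exists" (PySem.Str.lower (PySem.Str.join " " w)) then
                ["search console", "gsc", "google"] else [] := by
            intro w; unfold pvContrib; rw [hf]
          rw [hget "Reddit & Social Media" (by simp),
              hget "Quality Assurance" (by simp), hself,
              habsent "Credentials & Service Accounts" hs, pvPhraseEmpty2, hcontrib]
          split_ifs with hp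
          · rw [hp]
            simp only [List.any_nil, Bool.false_and, Bool.true_and, Bool.false_or, Bool.or_false,
              Bool.or_assoc, Bool.or_comm, Bool.or_left_comm]
          · rw [Bool.eq_false_iff.mpr hp]
            simp only [List.any_nil, Bool.false_and, Bool.true_and, Bool.false_or, Bool.or_false,
              Bool.or_assoc, Bool.or_comm, Bool.or_left_comm]
        · by_cases h3 : s = "Quality Assurance"
          · subst h3
            have hf : pvSectionEffect "Quality Assurance" =
                  some ("signed off", ["dashboard", "qa", "quality assurance"]) := by
              simp [pvSectionEffect, PySem.Dict.get?_mk_cons]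
            have hcontrib : ∀ w, pvContrib "Quality Assurance" w =
                if PySem.Str.isIn "signed off" (PySem.Str.lower (PySem.Str.join " " w)) then
                  ["dashboard", "qa", "quality assurance"] else [] := by
              intro w; unfold pvContrib; rw [hf]
            rw [hget "Reddit & Social Media" (by simp),
                hget "Credentials & Service Accounts" (by simp), hself,
                habsent "Quality Assurance" hs, pvPhraseEmpty3, hcontrib]
            split_ifs with hp
            · rw [hp]
              simp only [List.any_nil, Bool.false_and, Bool.true_and, Bool.false_or, Bool.or_false,
                Bool.or_assoc, Bool.or_comm, Bool.or_left_comm]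
            · rw [Bool.eq_false_iff.mpr hp]
              simp only [List.any_nil, Bool.false_and, Bool.true_and, Bool.false_or, Bool.or_false,
                Bool.or_assoc, Bool.or_comm, Bool.or_left_comm]
          · have hnone : pvContrib s v = [] := by
              unfold pvContrib
              rw [show pvSectionEffect s = none by
                simp only [pvSectionEffect, PySem.Dict.get?_mk_cons,
                  (by simpa using (Ne.symm h1) : ("Reddit & Social Media" == s) = false),
                  (by simpa using (Ne.symm h2) : ("Credentials & Service Accounts" == s) = false),
                  (by simpa using (Ne.symm h3) : ("Quality Assurance" == s) = false), if_false]
                rfl]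
            rw [hget "Reddit & Social Media" (Ne.symm h1),
                hget "Credentials & Service Accounts" (Ne.symm h2),
                hget "Quality Assurance" (Ne.symm h3), hnone]
            simp only [List.any_nil, Bool.false_or]

-- ===== VERDICT (by name: the statement is the Claim_ definition above) =====
set_option maxHeartbeats 4000000 in
theorem should_suppress_issue_spec : Claim_equal_should_suppress_issue := by
  intro issue_text assumptions _ hpre
  unfold Spec_should_suppress_issue
  simp only [should_suppress_issue, should_suppress_issue_alt]
  rw [pvActive_any (PySem.Str.lower issue_text) assumptions hpre]
  unfold pvA_check2 pvA_check3
  simp only [List.any_cons, List.any_nil, Bool.or_false]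
  generalize PySem.Str.isIn "rishi posts" (pvSectionText assumptions "Reddit & Social Media") = p1
  generalize PySem.Str.isIn "service account exists" (pvSectionText assumptions "Credentials & Service Accounts") = p2
  generalize PySem.Str.isIn "signed off" (pvSectionText assumptions "Quality Assurance") = p3
  generalize PySem.Str.isIn "reddit" (PySem.Str.lower issue_text) = r
  generalize PySem.Str.isIn "credential" (PySem.Str.lower issue_text) = c
  generalize PySem.Str.isIn "post" (PySem.Str.lower issue_text) = po
  generalize PySem.Str.isIn "search console" (PySem.Str.lower issue_text) = sc
  generalize PySem.Str.isIn "gsc" (PySem.Str.lower issue_text) = g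
  generalize PySem.Str.isIn "google" (PySem.Str.lower issue_text) = go
  generalize PySem.Str.isIn "dashboard" (PySem.Str.lower issue_text) = d
  generalize PySem.Str.isIn "qa" (PySem.Str.lower issue_text) = q
  generalize PySem.Str.isIn "quality assurance" (PySem.Str.lower issue_text) = qa
  cases p1 <;> cases p2 <;> cases p3 <;> cases r <;> cases c <;> cases po <;>
    cases sc <;> cases g <;> cases go <;> cases d <;> cases q <;> cases qa <;> rfl
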